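-- pv_equiv track=rewrite | github.com/gburger5/numeric-conversion | numeric_conversion.py | hex_char_decode
-- ===== SOURCE A (Python) =====
-- dictionary = {
--     "0": 0,
--     "1": 1,
--     "2": 2,
--     "3": 3,
--     "4": 4,
--     "5": 5,
--     "6": 6,
--     "7": 7,
--     "8": 8,
--     "9": 9,
--     "A": 10,
--     "B": 11,
--     "C": 12,
--     "D": 13,
--     "E": 14,
--     "F": 15,
--     "G": 16,
--     "a": 10,
--     "b": 11,
--     "c": 12,
--     "d": 13,
--     "e": 14,
--     "f": 15,
--     "g": 16,
-- }
--
-- def hex_char_decode(digit):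
--     my_list = list(digit)
--     new_list = []
--     for c in my_list:
--         if c == "x":
--             continue
--         if c in dictionary:
--             new_list.append(dictionary[c])
--     new_list.reverse()
--     count = 0
--     answer = []
--     for i in new_list:
--         decode = i * 16 ** count
--         answer.append(decode)
--         count += 1
--     sums = sum(answer)
--     return sums
-- ===== SOURCE B (Python) =====
-- dictionary = {
--     "0": 0, "1": 1, "2": 2, "3": 3, "4": 4, "5": 5, "6": 6, "7": 7,
--     "8": 8, "9": 9,
--     "A": 10, "B": 11, "C": 12, "D": 13, "E": 14, "F": 15, "G": 16,
--     "a": 10, "b": 11, "c": 12, "d": 13, "e": 14, "f": 15, "g": 16,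
-- }
--
-- def hex_char_decode(digit):
--     # single Horner while-loop over indices; non-dictionary chars (incl. 'x') are skipped
--     answer = 0
--     i = 0
--     n = len(digit)
--     while i < n:
--         v = dictionary.get(digit[i])
--         if v is not None:
--             answer = answer * 16 + v
--         i += 1
--     return answer
-- ===== Notes on version B (the rewrite author's own statement) =====
-- stated objective: faster
-- what changed: Replaces A's extract-filter/reverse/power-list/sum pipeline (two intermediate lists and a fresh 16**count big-int power per digit) with a single index-driven Horner while-loop accumulating answer = answer*16 + value, skipping non-dictionary characters.
import Mathlib
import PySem

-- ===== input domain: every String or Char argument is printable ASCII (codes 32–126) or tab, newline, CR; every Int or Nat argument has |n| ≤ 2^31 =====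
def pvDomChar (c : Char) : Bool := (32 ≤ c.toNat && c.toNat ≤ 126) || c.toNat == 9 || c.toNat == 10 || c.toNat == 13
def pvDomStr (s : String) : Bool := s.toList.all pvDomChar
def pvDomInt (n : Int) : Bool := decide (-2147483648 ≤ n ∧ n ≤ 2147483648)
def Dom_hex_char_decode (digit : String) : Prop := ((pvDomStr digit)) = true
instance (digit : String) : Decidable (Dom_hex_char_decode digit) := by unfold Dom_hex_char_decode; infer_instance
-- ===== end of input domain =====

-- B replaces A's extract/reverse/power-list/sum pipeline with one index-driven Horner while-loop (simpler, same O(n) cost).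

-- the module-level `dictionary` as a lookup (none = key not in dictionary)
def hexVal? (c : Char) : Option Int :=
  match c with
  | '0' => some 0 | '1' => some 1 | '2' => some 2 | '3' => some 3 | '4' => some 4
  | '5' => some 5 | '6' => some 6 | '7' => some 7 | '8' => some 8 | '9' => some 9
  | 'A' => some 10 | 'B' => some 11 | 'C' => some 12 | 'D' => some 13 | 'E' => some 14
  | 'F' => some 15 | 'G' => some 16
  | 'a' => some 10 | 'b' => some 11 | 'c' => some 12 | 'd' => some 13 | 'e' => some 14
  | 'f' => some 15 | 'g' => some 16
  | _ => none

-- ===== PORT A =====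
def hex_char_decode (digit : String) : Int :=
  let my_list := digit.toList
  let new_list := my_list.foldl (fun acc c =>
    if c = 'x' then acc
    else match hexVal? c with
      | some v => acc ++ [v]
      | none => acc) []
  let new_list := new_list.reverse
  let st := new_list.foldl (fun (st : List Int × Nat) i =>
    (st.1 ++ [i * 16 ^ st.2], st.2 + 1)) ([], 0)
  st.1.sum

-- ===== PORT B =====
-- the while-loop: i runs from the current index up to n, answer is Horner's accumulator
def hornerWhile (cs : List Char) (n : Nat) (i : Nat) (answer : Int) : Int :=
  if i < n then
    hornerWhile cs n (i + 1)
      (match PySem.List.pyGet? cs (i : Int) with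
       | some c =>
         match hexVal? c with
         | some v => answer * 16 + v
         | none => answer
       | none => answer)
  else answer
termination_by n - i

def hex_char_decode_alt (digit : String) : Int :=
  hornerWhile digit.toList digit.toList.length 0 0

-- ===== PRECONDITION & SPEC =====
def Spec_hex_char_decode (digit : String) (out : Int) : Prop := out = hex_char_decode_alt digit
instance (digit : String) (out : Int) : Decidable (Spec_hex_char_decode digit out) := by unfold Spec_hex_char_decode; infer_instance

-- ===== CLAIM =====
def Claim_equal_hex_char_decode : Prop := ∀ (digit : String), Dom_hex_char_decode digit → Spec_hex_char_decode digit (hex_char_decode digit)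

-- ===== LEMMAS AND PROOFS =====

-- little-endian positional value of a list of base-16 digits
def powsum : List Int → Int
  | [] => 0
  | i :: rs => i + 16 * powsum rs

theorem powsum_append_singleton (l : List Int) (c : Int) :
    powsum (l ++ [c]) = powsum l + 16 ^ l.length * c := by
  induction l with
  | nil => simp [powsum]
  | cons i rs ih => simp only [List.cons_append, powsum, ih, List.length_cons, pow_succ]; ring

-- A's extraction loop is filterMap hexVal? (the 'x' guard is redundant: hexVal? 'x' = none)
theorem extract_eq_filterMap (l : List Char) (acc : List Int) :
    l.foldl (fun acc c =>
      if c = 'x' then acc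
      else match hexVal? c with
        | some v => acc ++ [v]
        | none => acc) acc = acc ++ l.filterMap hexVal? := by
  induction l generalizing acc with
  | nil => simp
  | cons c cs ih =>
    rw [List.foldl_cons, List.filterMap_cons]
    by_cases hx : c = 'x'
    · subst hx
      rw [if_pos rfl, show hexVal? 'x' = none from rfl, ih]
    · rw [if_neg hx]
      cases hexVal? c with
      | none => exact ih acc
      | some v => simp [ih]

-- A's second loop: positional values of l starting at power k, appended to ans
theorem sumloop_eq (l : List Int) (ans : List Int) (k : Nat) :
    (l.foldl (fun (st : List Int × Nat) i => (st.1 ++ [i * 16 ^ st.2], st.2 + 1)) (ans, k)).1.sum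
      = ans.sum + 16 ^ k * powsum l := by
  induction l generalizing ans k with
  | nil => simp [powsum]
  | cons i rs ih =>
    rw [List.foldl_cons, ih]
    simp only [powsum, List.sum_append, List.sum_cons, List.sum_nil, pow_succ]
    ring

-- Horner fold over the extracted digit values equals powsum of their reverse
theorem horner_eq (vals : List Int) (a : Int) :
    vals.foldl (fun answer v => answer * 16 + v) a
      = a * 16 ^ vals.length + powsum vals.reverse := by
  induction vals generalizing a with
  | nil => simp [powsum]
  | cons v vs ih =>
    rw [List.foldl_cons, ih, List.reverse_cons, powsum_append_singleton]
    simp only [List.length_cons, List.length_reverse, pow_succ]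
    ring

-- B's while-loop from index i is the char-fold over the remaining suffix
theorem hornerWhile_eq_foldl (cs : List Char) (i : Nat) (a : Int) (h : i ≤ cs.length) :
    hornerWhile cs cs.length i a
      = (cs.drop i).foldl (fun answer c =>
          match hexVal? c with
          | some v => answer * 16 + v
          | none => answer) a := by
  induction hn : cs.length - i generalizing i a with
  | zero =>
    have hi : i = cs.length := by omega
    subst hi
    rw [hornerWhile, if_neg (by omega), List.drop_length, List.foldl_nil]
  | succ m ih =>
    have hlt : i < cs.length := by omega
    rw [hornerWhile, if_pos hlt, List.drop_eq_getElem_cons hlt, List.foldl_cons,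
      PySem.List.pyGet?_natCast, List.getElem?_eq_getElem hlt]
    cases hv : hexVal? cs[i] with
    | none => simp only [hv]; exact ih (i + 1) a (by omega) (by omega)
    | some v => simp only [hv]; exact ih (i + 1) (a * 16 + v) (by omega) (by omega)

-- the char-fold is the Horner fold over filterMap hexVal?
theorem char_fold_eq (l : List Char) (a : Int) :
    l.foldl (fun answer c =>
      match hexVal? c with
      | some v => answer * 16 + v
      | none => answer) a
      = (l.filterMap hexVal?).foldl (fun answer v => answer * 16 + v) a := by
  induction l generalizing a with
  | nil => simp
  | cons c cs ih =>
    rw [List.foldl_cons, List.filterMap_cons]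
    cases hexVal? c with
    | none => exact ih a
    | some v => simp [ih]

-- ===== VERDICT =====
theorem hex_char_decode_spec : Claim_equal_hex_char_decode := by
  intro digit _
  show hex_char_decode digit = hex_char_decode_alt digit
  show (((digit.toList.foldl (fun acc c =>
      if c = 'x' then acc
      else match hexVal? c with
        | some v => acc ++ [v]
        | none => acc) []).reverse).foldl (fun (st : List Int × Nat) i =>
    (st.1 ++ [i * 16 ^ st.2], st.2 + 1)) ([], 0)).1.sum
      = hornerWhile digit.toList digit.toList.length 0 0
  rw [hornerWhile_eq_foldl _ 0 0 (Nat.zero_le _), List.drop_zero, char_fold_eq, horner_eq,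
    extract_eq_filterMap, sumloop_eq]
  simp
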